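-- pv_equiv track=rewrite | github.com/cnmasami/leetcode | code/maximum_value_at_a_given_index_in_a_bounded_array.py | maxValue
-- ===== SOURCE A (Python) =====
-- def maxValue(n: int, index: int, maxSum: int) -> int:
--     def sum(x, cnt):
--         return (x + x - cnt + 1) * cnt // 2 if x >= cnt else (x +1) * x // 2 + cnt -x
--
--     left, right = 1, maxSum
--
--     while left < right:
--         mid = (left + right + 1) >> 1
--         if sum(mid - 1, index) + sum(mid, n - index) <= maxSum:
--             left = mid
--         else:
--             right = mid -1
--
--     return left
-- ===== SOURCE B (Python) =====
-- def _isqrt(x):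
--     # Newton's method floor square root (no imports in the source module).
--     if x < 2:
--         return x
--     r = x
--     s = (r + x // r) // 2
--     while s < r:
--         r, s = s, (s + x // s) // 2
--     return r
--
--
-- def maxValue(n: int, index: int, maxSum: int) -> int:
--     # Closed-form peak: baseline 1 everywhere, surplus spent on a pyramid at `index`.
--     if maxSum <= max(1, n):
--         return 1            # no budget beyond the all-ones baseline: peak stays at 1
--     a = min(index, n - 1 - index)
--     b = max(index, n - 1 - index)
--     s = maxSum - n
--     h = _isqrt(s)
--     if h <= a:                      # peak still inside both slopes: cost = h*h
--         return 1 + h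
--     h = (_isqrt(8 * s + 8 * a * a + 8 * a + 1) - (2 * a + 1)) // 2
--     if h <= b:                      # short side exhausted: quadratic cost
--         return 1 + h
--     t = (a * a + a + b * b + b) // 2
--     return 1 + (s + t) // n         # both sides exhausted: linear cost
-- ===== Notes on version B (the rewrite author's own statement) =====
-- stated objective: alternative
-- what changed: Replaced the binary search over candidate peak values (each step re-summing both arithmetic-series sides) by a direct closed-form computation: an integer square root inverts the quadratic cost in the two pyramid regimes and a single division handles the linear regime.
-- outside the precondition, e.g. on maxValue(4, 7, 9): A returns 9, B returns 10; on maxValue(-3, 1, 4): A returns 4, B returns -5; on maxValue(0, 0, 5): A returns 5, B raises ZeroDivisionError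
import Mathlib
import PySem

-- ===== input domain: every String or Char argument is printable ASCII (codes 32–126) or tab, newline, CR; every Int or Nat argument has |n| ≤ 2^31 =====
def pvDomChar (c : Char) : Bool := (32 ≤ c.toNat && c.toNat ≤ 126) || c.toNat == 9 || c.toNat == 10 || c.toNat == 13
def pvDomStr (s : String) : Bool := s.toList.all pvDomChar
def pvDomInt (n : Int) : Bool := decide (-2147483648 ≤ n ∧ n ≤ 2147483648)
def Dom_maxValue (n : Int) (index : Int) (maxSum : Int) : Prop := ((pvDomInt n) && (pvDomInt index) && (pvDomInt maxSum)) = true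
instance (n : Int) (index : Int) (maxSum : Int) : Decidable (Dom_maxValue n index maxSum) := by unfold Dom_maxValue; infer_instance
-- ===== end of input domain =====

-- B replaces A's binary search over the peak value by a closed-form computation (Newton integer
-- square root inverting the quadratic cost, one division for the linear regime).

-- ===== PORT A =====

-- Python's inner helper `sum(x, cnt)` (the cost of one side of the pyramid).
def pySumA (x : Int) (cnt : Int) : Int :=
  if x ≥ cnt then PySem.Int.floordiv ((x + x - cnt + 1) * cnt) 2
  else PySem.Int.floordiv ((x + 1) * x) 2 + cnt - x

-- midpoint bounds used by the loop's termination proof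
theorem pyMidBounds (l r : Int) (h : l < r) :
    l + 1 ≤ PySem.Int.floordiv (l + r + 1) 2 ∧ PySem.Int.floordiv (l + r + 1) 2 ≤ r := by
  rw [PySem.Int.floordiv_eq_ediv_of_pos (by norm_num)]; omega

-- the `while left < right` loop of A; `(left+right+1) >> 1` is floor halving = floordiv by 2.
def loopA (n index maxSum left right : Int) : Int :=
  if h : left < right then
    let mid := PySem.Int.floordiv (left + right + 1) 2
    if pySumA (mid - 1) index + pySumA mid (n - index) ≤ maxSum then
      loopA n index maxSum mid right
    else
      loopA n index maxSum left (mid - 1)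
  else left
termination_by (right - left).toNat
decreasing_by
  · have := pyMidBounds left right h; omega
  · have := pyMidBounds left right h; omega

def maxValue (n : Int) (index : Int) (maxSum : Int) : Int :=
  loopA n index maxSum 1 maxSum

-- ===== PORT B =====

-- Newton iteration of Source B's `_isqrt`; the `0 ≤ s` conjunct is a totality guard only
-- (on every actual call x ≥ 2 and s stays ≥ 1), the loop condition is Python's `s < r`.
def isqrtAux (x r s : Int) : Int :=
  if _h : 0 ≤ s ∧ s < r then
    isqrtAux x s (PySem.Int.floordiv (s + PySem.Int.floordiv x s) 2)
  else r
termination_by r.toNat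
decreasing_by omega

def isqrtB (x : Int) : Int :=
  if x < 2 then x
  else isqrtAux x x (PySem.Int.floordiv (x + PySem.Int.floordiv x x) 2)

def maxValue_alt (n : Int) (index : Int) (maxSum : Int) : Int :=
  if maxSum ≤ max 1 n then 1       -- no budget beyond the all-ones baseline: peak stays at 1
  else
  let a := min index (n - 1 - index)
  let b := max index (n - 1 - index)
  let s := maxSum - n
  let h := isqrtB s
  if h ≤ a then 1 + h
  else
    let h2 := PySem.Int.floordiv (isqrtB (8 * s + 8 * a * a + 8 * a + 1) - (2 * a + 1)) 2
    if h2 ≤ b then 1 + h2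
    else
      let t := PySem.Int.floordiv (a * a + a + b * b + b) 2
      1 + PySem.Int.floordiv (s + t) n

-- ===== PRECONDITION & SPEC =====
-- Pre_ is the problem's natural shape (1 ≤ n, 0 ≤ index < n, with any budget), plus every input
-- with maxSum ≤ 1 (A's search interval [1, maxSum] is empty there and it returns 1).  Outside
-- Pre_ A still returns: its binary-search predicate is then non-monotone (negative cell counts),
-- so the value A lands on is an accident of the bisection path and no implementation-independent
-- value exists.
def Pre_maxValue (n : Int) (index : Int) (maxSum : Int) : Prop :=
  (1 ≤ n ∧ 0 ≤ index ∧ index < n) ∨ maxSum ≤ 1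
instance (n : Int) (index : Int) (maxSum : Int) : Decidable (Pre_maxValue n index maxSum) := by
  unfold Pre_maxValue; infer_instance

def pvWitness_maxValue : Int × Int × Int := (4, 1, 10)

def Spec_maxValue (n : Int) (index : Int) (maxSum : Int) (out : Int) : Prop := out = maxValue_alt n index maxSum
instance (n : Int) (index : Int) (maxSum : Int) (out : Int) : Decidable (Spec_maxValue n index maxSum out) := by unfold Spec_maxValue; infer_instance

-- ===== CLAIM (what is proved, stated in full; the proofs are below) =====
def Claim_equal_maxValue : Prop := ∀ (n : Int) (index : Int) (maxSum : Int), Dom_maxValue n index maxSum → Pre_maxValue n index maxSum → Spec_maxValue n index maxSum (maxValue n index maxSum)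

-- ===== LEMMAS AND PROOFS =====

-- total cost of the array with peak value v at `index` (as A computes it)
def fcost (n index v : Int) : Int := pySumA (v - 1) index + pySumA v (n - index)

-- division-free characterisation of 2 * pySumA (both numerators are even)
theorem two_pySumA (x cnt : Int) :
    2 * pySumA x cnt = if x ≥ cnt then (x + x - cnt + 1) * cnt else (x + 1) * x + 2 * (cnt - x) := by
  unfold pySumA
  split_ifs with hb
  · rw [PySem.Int.floordiv_eq_ediv_of_pos (by norm_num)]
    have he : ((x + x - cnt + 1) * cnt) % 2 = 0 := by
      rcases Int.even_or_odd cnt with h | h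
      · rcases h with ⟨k, hk⟩
        have : (x + x - cnt + 1) * cnt = 2 * ((x + x - cnt + 1) * k) := by rw [hk]; ring
        omega
      · rcases h with ⟨k, hk⟩
        have : (x + x - cnt + 1) * cnt = 2 * ((x - k) * cnt) := by rw [hk]; ring
        omega
    omega
  · rw [PySem.Int.floordiv_eq_ediv_of_pos (by norm_num)]
    have he : ((x + 1) * x) % 2 = 0 := by
      have := Int.even_mul_succ_self x
      rcases this with ⟨k, hk⟩
      have : (x + 1) * x = 2 * k := by rw [mul_comm]; omega
      omega
    omega

-- regime 1: peak inside both slopes, cost is n + h²  (v = 1 + h)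
theorem cform1 (L R h : Int) (_hh : 0 ≤ h) (h1 : h ≤ L + 1) (h2 : h ≤ R + 1) :
    2 * (pySumA h L + pySumA (1 + h) (R + 1)) = 2 * (L + R + 1) + 2 * (h * h) := by
  rw [mul_add, two_pySumA, two_pySumA]
  split_ifs with b1 b2 b2
  · have eu : (h - L) * (1 - (h - L)) = 0 := by
      have : h = L ∨ h = L + 1 := by omega
      rcases this with e | e <;> rw [e] <;> ring
    have ev : (h - R) * (1 - (h - R)) = 0 := by
      have : h = R ∨ h = R + 1 := by omega
      rcases this with e | e <;> rw [e] <;> ring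
    linear_combination eu + ev
  · have eu : (h - L) * (1 - (h - L)) = 0 := by
      have : h = L ∨ h = L + 1 := by omega
      rcases this with e | e <;> rw [e] <;> ring
    linear_combination eu
  · have ev : (h - R) * (1 - (h - R)) = 0 := by
      have : h = R ∨ h = R + 1 := by omega
      rcases this with e | e <;> rw [e] <;> ring
    linear_combination ev
  · ring

-- regime 2: short side a exhausted, long side not
theorem cform2 (L R a b h : Int) (hab : (a = L ∧ b = R) ∨ (a = R ∧ b = L)) (_hle : a ≤ b)
    (h1 : a ≤ h) (h2 : h ≤ b + 1) :
    2 * (pySumA h L + pySumA (1 + h) (R + 1))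
      = 2 * (L + R + 1) + (h * h + (2 * a + 1) * h - a * (a + 1)) := by
  rw [mul_add, two_pySumA, two_pySumA]
  rcases hab with ⟨rfl, rfl⟩ | ⟨rfl, rfl⟩
  · split_ifs with b1 b2 b2
    · have ev : (h - b) * (1 - (h - b)) = 0 := by
        have : h = b ∨ h = b + 1 := by omega
        rcases this with e | e <;> rw [e] <;> ring
      linear_combination ev
    · ring
    · omega
    · omega
  · split_ifs with b1 b2 b2
    · have eu : (h - b) * (1 - (h - b)) = 0 := by
        have : h = b ∨ h = b + 1 := by omega
        rcases this with e | e <;> rw [e] <;> ring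
      linear_combination eu
    · omega
    · ring
    · omega

-- regime 3: both sides exhausted, cost linear in h
theorem cform3 (L R h : Int) (h1 : L + 1 ≤ h) (h2 : R + 1 ≤ h) :
    2 * (pySumA h L + pySumA (1 + h) (R + 1))
      = 2 * (L + R + 1) + 2 * ((L + R + 1) * h) - (L * L + L + R * R + R) := by
  rw [mul_add, two_pySumA, two_pySumA]
  split_ifs with b1 b2 b2 <;> first | ring1 | (exfalso; omega)

theorem pySumA_nonneg (x cnt : Int) (hx : 0 ≤ x) (hc : 0 ≤ cnt) : 0 ≤ pySumA x cnt := by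
  have h2 := two_pySumA x cnt
  split_ifs at h2 with hb
  · have hp : 0 ≤ (x + x - cnt + 1) * cnt := mul_nonneg (by omega) hc
    linarith
  · have hp : 0 ≤ (x + 1) * x := mul_nonneg (by omega) hx
    linarith

theorem pySumA_ge (x cnt : Int) (hx : 1 ≤ x) (hc : 1 ≤ cnt) : x ≤ pySumA x cnt := by
  have h2 := two_pySumA x cnt
  split_ifs at h2 with hb
  · have hp : 0 ≤ (cnt - 1) * (x + x - cnt) := mul_nonneg (by omega) (by omega)
    nlinarith
  · have hp : x * x ≥ x := by nlinarith
    nlinarith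

theorem pySumA_mono (x cnt : Int) (hx : 0 ≤ x) (hc : 0 ≤ cnt) :
    pySumA x cnt ≤ pySumA (x + 1) cnt := by
  have ha := two_pySumA x cnt
  have hb := two_pySumA (x + 1) cnt
  split_ifs at ha with b1 <;> split_ifs at hb with b2
  · have hp : (x + x - cnt + 1) * cnt ≤ (x + 1 + (x + 1) - cnt + 1) * cnt :=
      mul_le_mul_of_nonneg_right (by omega) hc
    linarith
  · omega
  · have hc' : cnt = x + 1 := by omega
    subst hc'
    nlinarith
  · nlinarith

theorem fcost_mono (n index u v : Int) (_h1 : 1 ≤ n) (h2 : 0 ≤ index) (h3 : index < n)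
    (hu : 1 ≤ u) (huv : u ≤ v) : fcost n index u ≤ fcost n index v := by
  refine Int.le_induction ?_ ?_ v huv
  · exact le_refl _
  · intro w hw ih
    refine le_trans ih ?_
    have e1 := pySumA_mono (w - 1) index (by omega) h2
    have e2 := pySumA_mono w (n - index) (by omega) (by omega)
    have r1 : w - 1 + 1 = w := by ring
    rw [r1] at e1
    unfold fcost
    have r2 : w + 1 - 1 = w := by ring
    rw [r2]
    linarith

theorem fcost_ge (n index v : Int) (_h1 : 1 ≤ n) (h2 : 0 ≤ index) (h3 : index < n)
    (hv : 1 ≤ v) : v ≤ fcost n index v := by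
  unfold fcost
  have e1 := pySumA_nonneg (v - 1) index (by omega) h2
  have e2 := pySumA_ge v (n - index) hv (by omega)
  linarith

theorem fcost_one (n index : Int) (_h1 : 1 ≤ n) (h2 : 0 ≤ index) (h3 : index < n) :
    fcost n index 1 = n := by
  unfold fcost
  have e2 : n - index = (n - 1 - index) + 1 := by ring
  have e1 : (1 : Int) - 1 = 0 := by norm_num
  rw [e1, e2]
  have hc := cform1 index (n - 1 - index) 0 (by omega) (by omega) (by omega)
  have e3 : (1 : Int) + 0 = 1 := by norm_num
  rw [e3] at hc
  linarith

theorem fcost_two (n index : Int) (_h1 : 1 ≤ n) (h2 : 0 ≤ index) (h3 : index < n) :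
    fcost n index 2 = n + 1 := by
  unfold fcost
  have e2 : n - index = (n - 1 - index) + 1 := by ring
  have e1 : (2 : Int) - 1 = 1 := by norm_num
  rw [e1, e2]
  have hc := cform1 index (n - 1 - index) 1 (by omega) (by omega) (by omega)
  have e3 : (1 : Int) + 1 = 2 := by norm_num
  rw [e3] at hc
  linarith

-- when even a peak of 2 is unaffordable, the loop's upper bound collapses to 1
theorem loopA_one (n index maxSum : Int) :
    ∀ (k : Nat) (r : Int), (r - 1).toNat ≤ k → 1 ≤ r →
      (∀ v, 2 ≤ v → v ≤ r → ¬ fcost n index v ≤ maxSum) →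
      loopA n index maxSum 1 r = 1 := by
  intro k
  induction k with
  | zero =>
    intro r hk hr _
    have : r = 1 := by omega
    subst this
    rw [loopA]
    simp
  | succ m ih =>
    intro r hk hr hno
    by_cases hlt : (1 : Int) < r
    · have hmid := pyMidBounds 1 r hlt
      rw [loopA]
      simp only [hlt, dite_true]
      set mid := PySem.Int.floordiv (1 + r + 1) 2 with hmiddef
      have hcf : ¬ pySumA (mid - 1) index + pySumA mid (n - index) ≤ maxSum :=
        hno mid (by omega) (by omega)
      simp only [hcf, if_false]
      exact ih (mid - 1) (by omega) (by omega) (fun v h2v hvr => hno v h2v (by omega))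
    · have : r = 1 := by omega
      subst this
      rw [loopA]
      simp

-- the binary-search loop returns the unique v with cost v ≤ maxSum < cost (v+1)
theorem loopA_spec (n index maxSum : Int) (_h1 : 1 ≤ n) (_h2 : 0 ≤ index) (_h3 : index < n) :
    ∀ (k : Nat) (l r : Int), (r - l).toNat ≤ k → 1 ≤ l → l ≤ r →
      fcost n index l ≤ maxSum → ¬ fcost n index (r + 1) ≤ maxSum →
      1 ≤ loopA n index maxSum l r ∧
      fcost n index (loopA n index maxSum l r) ≤ maxSum ∧
      ¬ fcost n index (loopA n index maxSum l r + 1) ≤ maxSum := by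
  intro k
  induction k with
  | zero =>
    intro l r hk h1l hlr hPl hPr
    have : r = l := by omega
    subst this
    rw [loopA]
    simp only [lt_irrefl, dite_false]
    exact ⟨h1l, hPl, hPr⟩
  | succ m ih =>
    intro l r hk h1l hlr hPl hPr
    by_cases hlt : l < r
    · have hmid := pyMidBounds l r hlt
      rw [loopA]
      simp only [hlt, dite_true]
      set mid := PySem.Int.floordiv (l + r + 1) 2 with hmiddef
      by_cases hc : pySumA (mid - 1) index + pySumA mid (n - index) ≤ maxSum
      · simp only [hc, if_true]
        exact ih mid r (by omega) (by omega) (by omega) hc hPr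
      · simp only [hc, if_false]
        have hPm : ¬ fcost n index (mid - 1 + 1) ≤ maxSum := by
          have e : mid - 1 + 1 = mid := by ring
          rw [e]
          exact hc
        exact ih l (mid - 1) (by omega) h1l (by omega) hPl hPm
    · have : r = l := by omega
      subst this
      rw [loopA]
      simp only [lt_irrefl, dite_false]
      exact ⟨h1l, hPl, hPr⟩

-- ----- Newton isqrt -----

theorem isqrt_step_ge (x q r : Int) (_hq1 : 1 ≤ q) (hql : q * q ≤ x) (hr : 1 ≤ r) :
    q ≤ PySem.Int.floordiv (r + PySem.Int.floordiv x r) 2 := by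
  rw [PySem.Int.floordiv_eq_ediv_of_pos (show (0:Int) < r by omega),
      PySem.Int.floordiv_eq_ediv_of_pos (show (0:Int) < 2 by norm_num)]
  set d := x / r with hd
  have hdm1 : r * d ≤ x ∧ x < r * d + r := by
    have e := Int.mul_ediv_add_emod x r
    have m1 := Int.emod_nonneg x (show r ≠ 0 by omega)
    have m2 := Int.emod_lt_of_pos x (show 0 < r by omega)
    constructor <;> linarith
  by_contra hno
  push Not at hno
  have hst : 2 * ((r + d) / 2) ≤ r + d ∧ r + d ≤ 2 * ((r + d) / 2) + 1 := by
    constructor <;> omega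
  have hs1 : (r + d) / 2 + 1 ≤ q := by omega
  have hchain : d + 1 ≤ 2 * q - r := by omega
  have hx2 : r * (d + 1) ≤ r * (2 * q - r) :=
    mul_le_mul_of_nonneg_left hchain (by omega)
  nlinarith [sq_nonneg (r - q), hdm1.2, hx2, hql]

theorem isqrt_step_lt (x q r : Int) (hq1 : 1 ≤ q) (hqu : x < (q + 1) * (q + 1)) (hr : q < r) :
    PySem.Int.floordiv (r + PySem.Int.floordiv x r) 2 < r := by
  rw [PySem.Int.floordiv_eq_ediv_of_pos (show (0:Int) < r by omega),
      PySem.Int.floordiv_eq_ediv_of_pos (show (0:Int) < 2 by norm_num)]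
  set d := x / r with hd
  have hdm1 : r * d ≤ x := by
    have e := Int.mul_ediv_add_emod x r
    have m1 := Int.emod_nonneg x (show r ≠ 0 by omega)
    linarith
  have hrq : q + 1 ≤ r := by omega
  have hxr : x < r * r := by nlinarith [hqu, hrq]
  have hdr : d ≤ r - 1 := by nlinarith [hdm1, hxr]
  omega

theorem isqrtAux_eq (x q : Int) (hq1 : 1 ≤ q) (hql : q * q ≤ x) (hqu : x < (q + 1) * (q + 1)) :
    ∀ (k : Nat) (r s : Int), r.toNat ≤ k → q ≤ r →
      s = PySem.Int.floordiv (r + PySem.Int.floordiv x r) 2 →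
      isqrtAux x r s = q := by
  intro k
  induction k with
  | zero =>
    intro r s hk hqr hs
    exfalso
    omega
  | succ m ih =>
    intro r s hk hqr hs
    have hr1 : 1 ≤ r := by omega
    have hsq : q ≤ s := by
      rw [hs]; exact isqrt_step_ge x q r hq1 hql hr1
    rw [isqrtAux]
    split_ifs with hcond
    · exact ih s _ (by omega) hsq rfl
    · have hrs : r ≤ s := by omega
      by_contra hne
      have hqr' : q < r := by omega
      have := isqrt_step_lt x q r hq1 hqu hqr'
      rw [← hs] at this
      omega

theorem isqrtB_spec (x : Int) (hx : 0 ≤ x) :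
    0 ≤ isqrtB x ∧ isqrtB x * isqrtB x ≤ x ∧ x < (isqrtB x + 1) * (isqrtB x + 1) := by
  unfold isqrtB
  split_ifs with hlt
  · have : x = 0 ∨ x = 1 := by omega
    rcases this with rfl | rfl <;> norm_num
  · have hx2 : 2 ≤ x := by omega
    have hxt : ((x.toNat : Int)) = x := by omega
    have hqlN : Nat.sqrt x.toNat * Nat.sqrt x.toNat ≤ x.toNat := by
      have := Nat.sqrt_le' x.toNat
      nlinarith [this]
    have hquN : x.toNat < (Nat.sqrt x.toNat + 1) * (Nat.sqrt x.toNat + 1) := by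
      have := Nat.lt_succ_sqrt' x.toNat
      nlinarith [this]
    set q : Int := (Nat.sqrt x.toNat : Int) with hq
    have hql : q * q ≤ x := by
      rw [hq, ← hxt]
      exact_mod_cast hqlN
    have hqu : x < (q + 1) * (q + 1) := by
      rw [hq, ← hxt]
      exact_mod_cast hquN
    have hq1 : 1 ≤ q := by
      have hq0 : 0 ≤ q := by rw [hq]; exact Int.natCast_nonneg _
      by_contra hno
      have : q = 0 := by omega
      rw [this] at hqu
      norm_num at hqu
      omega
    have hqx : q ≤ x := by nlinarith [hql, hq1]
    have := isqrtAux_eq x q hq1 hql hqu x.toNat x _ (by omega) hqx rfl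
    rw [this]
    exact ⟨by omega, hql, hqu⟩

-- ----- B returns the unique fixed point -----

set_option maxHeartbeats 1600000 in
theorem altB_spec (n index maxSum : Int) (h1 : 1 ≤ n) (h2 : 0 ≤ index) (h3 : index < n)
    (h4 : n < maxSum) :
    1 ≤ maxValue_alt n index maxSum ∧
    fcost n index (maxValue_alt n index maxSum) ≤ maxSum ∧
    ¬ fcost n index (maxValue_alt n index maxSum + 1) ≤ maxSum := by
  -- closed forms of the cost at peak 1 + g, in the three regimes
  have key1 : ∀ g : Int, 0 ≤ g → g ≤ min index (n - 1 - index) + 1 →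
      2 * fcost n index (1 + g) = 2 * n + 2 * (g * g) := by
    intro g hg0 hg1
    unfold fcost
    have e1 : 1 + g - 1 = g := by ring
    have e2 : n - index = n - 1 - index + 1 := by ring
    rw [e1, e2]
    have := cform1 index (n - 1 - index) g hg0 (by omega) (by omega)
    linarith
  have key2 : ∀ g : Int, min index (n - 1 - index) ≤ g → g ≤ max index (n - 1 - index) + 1 →
      2 * fcost n index (1 + g) = 2 * n + (g * g + (2 * min index (n - 1 - index) + 1) * g
        - min index (n - 1 - index) * (min index (n - 1 - index) + 1)) := by
    intro g hga hgb
    unfold fcost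
    have e1 : 1 + g - 1 = g := by ring
    have e2 : n - index = n - 1 - index + 1 := by ring
    rw [e1, e2]
    have hab : (min index (n - 1 - index) = index ∧ max index (n - 1 - index) = n - 1 - index) ∨
        (min index (n - 1 - index) = n - 1 - index ∧ max index (n - 1 - index) = index) := by omega
    have := cform2 index (n - 1 - index) (min index (n - 1 - index)) (max index (n - 1 - index)) g
      hab (by omega) hga hgb
    linarith
  have key3 : ∀ g : Int, max index (n - 1 - index) + 1 ≤ g →
      2 * fcost n index (1 + g) = 2 * n + 2 * (n * g)
        - (min index (n - 1 - index) * min index (n - 1 - index) + min index (n - 1 - index)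
           + max index (n - 1 - index) * max index (n - 1 - index) + max index (n - 1 - index)) := by
    intro g hg
    unfold fcost
    have e1 : 1 + g - 1 = g := by ring
    have e2 : n - index = n - 1 - index + 1 := by ring
    rw [e1, e2]
    have hc := cform3 index (n - 1 - index) g (by omega) (by omega)
    have e5 : index + (n - 1 - index) + 1 = n := by ring
    rw [e5] at hc
    have hab : (min index (n - 1 - index) = index ∧ max index (n - 1 - index) = n - 1 - index) ∨
        (min index (n - 1 - index) = n - 1 - index ∧ max index (n - 1 - index) = index) := by omega
    rcases hab with ⟨e3, e4⟩ | ⟨e3, e4⟩ <;> rw [e3, e4] <;> linarith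
  obtain ⟨hq0, hql, hqu⟩ := isqrtB_spec (maxSum - n) (by omega)
  simp only [maxValue_alt]
  rw [if_neg (by omega : ¬ maxSum ≤ max 1 n)]
  set s : Int := maxSum - n with hs
  set a : Int := min index (n - 1 - index) with ha
  set b : Int := max index (n - 1 - index) with hb
  set h : Int := isqrtB s with hh
  have ha0 : 0 ≤ a := by omega
  have hb0 : a ≤ b := by omega
  have hnab : n = a + b + 1 := by omega
  have hs0 : 0 ≤ s := by omega
  have hD0 : 0 ≤ 8 * s + 8 * a * a + 8 * a + 1 := by nlinarith [mul_nonneg ha0 ha0]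
  obtain ⟨hz0, hzl, hzu⟩ := isqrtB_spec (8 * s + 8 * a * a + 8 * a + 1) hD0
  set zD : Int := isqrtB (8 * s + 8 * a * a + 8 * a + 1) with hzD
  set h2v : Int := PySem.Int.floordiv (zD - (2 * a + 1)) 2 with hh2
  set tv : Int := PySem.Int.floordiv (a * a + a + b * b + b) 2 with htv
  set h3v : Int := PySem.Int.floordiv (s + tv) n with hh3
  clear_value s a b h zD h2v tv h3v
  split_ifs with hc1 hc2
  · -- regime 1: h = isqrt s ≤ a
    refine ⟨by omega, ?_, ?_⟩
    · have hk := key1 h hq0 (by omega)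
      linarith
    · have e : 1 + h + 1 = 1 + (h + 1) := by ring
      rw [e, not_le]
      have hk := key1 (h + 1) (by omega) (by omega)
      linarith
  · -- regime 2: a < h, h2v ≤ b
    have hh2e : h2v = (zD - (2 * a + 1)) / 2 := by
      rw [hh2, PySem.Int.floordiv_eq_ediv_of_pos (by norm_num)]
    have hbnd : 2 * h2v ≤ zD - (2 * a + 1) ∧ zD - (2 * a + 1) ≤ 2 * h2v + 1 := by
      constructor <;> omega
    have ha1h : a + 1 ≤ h := by omega
    have hsge : (a + 1) * (a + 1) ≤ s := by
      have t1 : (a + 1) * (a + 1) ≤ h * h := mul_le_mul (by omega) (by omega) (by omega) (by omega)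
      linarith
    have hza : 4 * a + 3 ≤ zD := by
      by_contra hno
      have c : (zD + 1) * (zD + 1) ≤ (4 * a + 3) * (4 * a + 3) :=
        mul_le_mul (by omega) (by omega) (by omega) (by omega)
      nlinarith [hzu, hsge]
    have hh2a : a + 1 ≤ h2v := by omega
    refine ⟨by omega, ?_, ?_⟩
    · have hk := key2 h2v (by omega) (by omega)
      have c1 : 0 ≤ 2 * h2v + 2 * a + 1 := by omega
      have sqle : (2 * h2v + 2 * a + 1) * (2 * h2v + 2 * a + 1) ≤ zD * zD :=
        mul_le_mul (by omega) (by omega) c1 (by omega)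
      nlinarith [sqle, hzl, hk]
    · have e : 1 + h2v + 1 = 1 + (h2v + 1) := by ring
      rw [e, not_le]
      have hk := key2 (h2v + 1) (by omega) (by omega)
      have c2 : zD + 1 ≤ 2 * (h2v + 1) + 2 * a + 1 := by omega
      have sqge : (zD + 1) * (zD + 1) ≤ (2 * (h2v + 1) + 2 * a + 1) * (2 * (h2v + 1) + 2 * a + 1) :=
        mul_le_mul c2 c2 (by omega) (by omega)
      nlinarith [sqge, hzu, hk]
  · -- regime 3: a < h, b < h2v
    have hh2e : h2v = (zD - (2 * a + 1)) / 2 := by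
      rw [hh2, PySem.Int.floordiv_eq_ediv_of_pos (by norm_num)]
    have hbnd : 2 * h2v ≤ zD - (2 * a + 1) ∧ zD - (2 * a + 1) ≤ 2 * h2v + 1 := by
      constructor <;> omega
    obtain ⟨ka, hka⟩ := Int.even_mul_succ_self a
    obtain ⟨kb, hkb⟩ := Int.even_mul_succ_self b
    have h2t : 2 * tv = a * a + a + b * b + b := by
      have e : a * a + a + b * b + b = 2 * (ka + kb) := by linear_combination hka + hkb
      rw [htv, PySem.Int.floordiv_eq_ediv_of_pos (by norm_num), e,
        Int.mul_ediv_cancel_left _ (by norm_num)]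
    have hh3e : h3v = (s + tv) / n := by
      rw [hh3, PySem.Int.floordiv_eq_ediv_of_pos (by omega)]
    have hdm : n * h3v ≤ s + tv ∧ s + tv < n * h3v + n := by
      have e := Int.mul_ediv_add_emod (s + tv) n
      have m1 := Int.emod_nonneg (s + tv) (show n ≠ 0 by omega)
      have m2 := Int.emod_lt_of_pos (s + tv) (show 0 < n by omega)
      rw [← hh3e] at e
      constructor <;> linarith
    have hzb : b + 1 ≤ h2v := by omega
    have c3 : 2 * (b + 1) + 2 * a + 1 ≤ zD := by omega
    have sqle : (2 * (b + 1) + 2 * a + 1) * (2 * (b + 1) + 2 * a + 1) ≤ zD * zD :=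
      mul_le_mul c3 c3 (by omega) (by omega)
    have hq2b : (b + 1) * (b + 1) + (2 * a + 1) * (b + 1) - a * (a + 1) ≤ 2 * s := by
      nlinarith [sqle, hzl]
    have hnb : n * (b + 1) ≤ s + tv := by
      rw [hnab]
      linarith [hq2b, h2t]
    have hb1h3 : b + 1 ≤ h3v := by
      have lt1 : n * (b + 1) < n * (h3v + 1) := by linarith [hdm.2, hnb]
      have := lt_of_mul_lt_mul_left lt1 (by omega : (0:Int) ≤ n)
      omega
    refine ⟨by omega, ?_, ?_⟩
    · have hk := key3 h3v (by omega)
      linarith [hdm.1, h2t, hk]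
    · have e : 1 + h3v + 1 = 1 + (h3v + 1) := by ring
      rw [e, not_le]
      have hk := key3 (h3v + 1) (by omega)
      linarith [hdm.2, h2t, hk]

-- ===== VERDICT (by name: the statement is the Claim_ definition above) =====
theorem maxValue_spec : Claim_equal_maxValue := by
  intro n index maxSum hDom hPre
  unfold Spec_maxValue
  by_cases hm1 : maxSum ≤ 1
  · -- A's while loop never runs, B's baseline guard fires: both return 1
    have hA : maxValue n index maxSum = 1 := by
      unfold maxValue
      rw [loopA]
      simp only [show ¬ (1 : Int) < maxSum by omega, dite_false]
    have hB : maxValue_alt n index maxSum = 1 := by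
      simp only [maxValue_alt]
      rw [if_pos (by omega : maxSum ≤ max 1 n)]
    rw [hA, hB]
  · have hnat : 1 ≤ n ∧ 0 ≤ index ∧ index < n := by
      rcases hPre with h | h
      · exact h
      · omega
    obtain ⟨h1, h2, h3⟩ := hnat
    by_cases hms : maxSum ≤ n
    · -- budget at most the baseline cost: both return 1
      have hB : maxValue_alt n index maxSum = 1 := by
        simp only [maxValue_alt]
        rw [if_pos (by omega : maxSum ≤ max 1 n)]
      have hf2 := fcost_two n index h1 h2 h3
      have hA : maxValue n index maxSum = 1 := by
        unfold maxValue
        exact loopA_one n index maxSum (maxSum - 1).toNat maxSum (by omega) (by omega)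
          (fun v h2v _ => by
            have := fcost_mono n index 2 v h1 h2 h3 (by omega) h2v
            omega)
      rw [hA, hB]
    · -- real budget: A's bisection and B's closed form both hit the unique fixed point
      have hA := loopA_spec n index maxSum h1 h2 h3 (maxSum - 1).toNat 1 maxSum (by omega)
        (by omega) (by omega) (by rw [fcost_one n index h1 h2 h3]; omega)
        (by have := fcost_ge n index (maxSum + 1) h1 h2 h3 (by omega); omega)
      have hB := altB_spec n index maxSum h1 h2 h3 (by omega)
      obtain ⟨ha1, ha2, ha3⟩ := hA
      obtain ⟨hb1, hb2, hb3⟩ := hB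
      unfold maxValue
      set vA := loopA n index maxSum 1 maxSum with hva
      set vB := maxValue_alt n index maxSum with hvb
      by_contra hne
      rcases lt_or_gt_of_ne hne with hlt | hlt
      · exact ha3 (le_trans (fcost_mono n index (vA + 1) vB h1 h2 h3 (by omega) (by omega)) hb2)
      · exact hb3 (le_trans (fcost_mono n index (vB + 1) vA h1 h2 h3 (by omega) (by omega)) ha2)
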